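-- pv_equiv track=rewrite | github.com/gdraheim/zziplib | docs/tools/md2dbk.py | escapes
-- ===== SOURCE A (Python) =====
-- escaping = {"*": "ast", "[": "lbra", "]": "rbra", "(": "lpar", ")": "rpar", "\n<br />": "br"}
--
-- def escapes(block: str) -> str:
--     """ it does html escape plus remove backslash escapes """
--     # the backslash will use escaping/descaping codes to help inline markup later
--     text = ""
--     esc = ""
--     for c in block:
--         if esc == "\\":
--             if c == "\r":
--                 esc = "\r"
--                 continue
--             if c == "\n":
--                 esc = ""
--                 text += "&br;"
--                 continue
--             if c in escaping:
--                 text += "&%s;" % escaping[c]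
--             else:
--                 text += c
--             esc = ""
--             continue
--         if esc == "\r":
--             if c == "\n":
--                 esc = ""
--                 text += "&br;"
--                 continue
--             esc = ""
--             # fallthrough
--         if c == "\\":
--             esc = c
--             continue
--         if c == "`":
--             text += "`"
--             continue
--         if c == "<":
--             text += "&lt;"
--             continue
--         if c == ">":
--             text += "&gt;"
--             continue
--         if c == "&":
--             text += "&amp;"
--             continue
--         if c == "\"":
--             text += "&quot;"
--             continue
--         text += c
--     return text
-- ===== SOURCE B (Python) =====
-- escaping = {"*": "ast", "[": "lbra", "]": "rbra", "(": "lpar", ")": "rpar", "\n<br />": "br"}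
--
-- def _html(c):
--     if c == "<":
--         return "&lt;"
--     if c == ">":
--         return "&gt;"
--     if c == "&":
--         return "&amp;"
--     if c == "\"":
--         return "&quot;"
--     return c
--
-- def escapes(block: str) -> str:
--     """ html escape plus backslash escape handling, via an index loop with lookahead """
--     out = []
--     i = 0
--     n = len(block)
--     while i < n:
--         c = block[i]
--         if c == "\\":
--             if i + 1 == n:
--                 break  # trailing backslash emits nothing
--             d = block[i + 1]
--             if d == "\r":
--                 if i + 2 < n and block[i + 2] == "\n":
--                     out.append("&br;")
--                     i += 3
--                 else:
--                     i += 2  # backslash+CR consumed, next char handled normally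
--                 continue
--             if d == "\n":
--                 out.append("&br;")
--             elif d in escaping:
--                 out.append("&%s;" % escaping[d])
--             else:
--                 out.append(d)
--             i += 2
--             continue
--         out.append(_html(c))
--         i += 1
--     return "".join(out)
-- ===== Notes on version B (the rewrite author's own statement) =====
-- stated objective: alternative
-- what changed: Replaced A's state-variable (esc) character loop with an index-driven scan that looks ahead after a backslash and consumes the whole escape sequence at once, collecting pieces in a list joined at the end.
import Mathlib
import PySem

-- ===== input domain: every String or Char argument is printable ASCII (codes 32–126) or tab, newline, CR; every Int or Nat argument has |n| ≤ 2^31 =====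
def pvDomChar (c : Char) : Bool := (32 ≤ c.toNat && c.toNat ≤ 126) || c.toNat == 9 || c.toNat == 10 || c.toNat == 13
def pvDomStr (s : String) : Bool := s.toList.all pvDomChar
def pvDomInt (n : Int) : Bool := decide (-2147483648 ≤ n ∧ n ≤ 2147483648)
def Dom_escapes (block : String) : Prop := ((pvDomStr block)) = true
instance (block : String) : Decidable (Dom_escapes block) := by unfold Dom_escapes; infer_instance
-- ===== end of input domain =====

-- B replaces A's state-variable character loop by an index/lookahead scan that pattern-matches
-- on backslash sequences directly (objective: alternative decomposition; return value only).


-- ===== PORT A =====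
-- the module-level `escaping` dict (insertion order kept; the "\n<br />" key never matches a single char)
def escMap : PySem.Dict String String :=
  PySem.Dict.ofList [("*", "ast"), ("[", "lbra"), ("]", "rbra"), ("(", "lpar"), (")", "rpar"), ("\n<br />", "br")]

-- one iteration of A's for-loop: state = (text, esc)
def escapesStep (st : String × String) (c : Char) : String × String :=
  let text := st.1
  let esc := st.2
  if esc = "\\" then
    if c = '\r' then (text, "\r")
    else if c = '\n' then (text ++ "&br;", "")
    else
      match PySem.Dict.get? escMap (String.singleton c) with
      | some v => (text ++ "&" ++ v ++ ";", "")
      | none => (text ++ String.singleton c, "")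
  else
    -- `if esc == "\r": if c == "\n": …` ; otherwise esc is cleared and the code falls through
    if esc = "\r" ∧ c = '\n' then (text ++ "&br;", "")
    else if c = '\\' then (text, "\\")
    else if c = '`' then (text ++ "`", "")
    else if c = '<' then (text ++ "&lt;", "")
    else if c = '>' then (text ++ "&gt;", "")
    else if c = '&' then (text ++ "&amp;", "")
    else if c = '"' then (text ++ "&quot;", "")
    else (text ++ String.singleton c, "")

def escapes (block : String) : String :=
  (block.toList.foldl escapesStep ("", "")).1

-- ===== PORT B =====
-- B's helper _html(c)
def htmlB (c : Char) : String :=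
  if c = '<' then "&lt;"
  else if c = '>' then "&gt;"
  else if c = '&' then "&amp;"
  else if c = '"' then "&quot;"
  else String.singleton c

-- the piece B emits for a backslash-escaped character d (the `d in escaping` branch)
def escPiece (d : Char) : String :=
  match PySem.Dict.get? escMap (String.singleton d) with
  | some v => "&" ++ v ++ ";"
  | none => String.singleton d

-- B's while-loop over the index, as recursion on the remaining characters (lookahead = patterns)
def escapesAltGo : List Char → String
  | [] => ""
  | '\\' :: [] => ""                                          -- trailing backslash: emit nothing
  | '\\' :: '\r' :: '\n' :: rest => "&br;" ++ escapesAltGo rest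
  | '\\' :: '\r' :: rest => escapesAltGo rest                 -- consume backslash+CR, reprocess rest
  | '\\' :: '\n' :: rest => "&br;" ++ escapesAltGo rest
  | '\\' :: d :: rest => escPiece d ++ escapesAltGo rest
  | c :: rest => htmlB c ++ escapesAltGo rest

def escapes_alt (block : String) : String :=
  escapesAltGo block.toList

-- ===== PRECONDITION & SPEC =====
def Spec_escapes (block : String) (out : String) : Prop := out = escapes_alt block
instance (block : String) (out : String) : Decidable (Spec_escapes block out) := by unfold Spec_escapes; infer_instance

-- ===== CLAIM (what is proved, stated in full; the proofs are below) =====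
def Claim_equal_escapes : Prop := ∀ (block : String), Dom_escapes block → Spec_escapes block (escapes block)

-- ===== LEMMAS AND PROOFS =====

-- with esc = "\r" and next char ≠ '\n', A clears esc and falls through: same as esc = ""
theorem step_cr_of_ne (text : String) (c : Char) (h : c ≠ '\n') :
    escapesStep (text, "\r") c = escapesStep (text, "") c := by
  simp [escapesStep, h]

-- the non-backslash character piece of A equals B's _html
theorem step_plain (text : String) (c : Char) (h : c ≠ '\\') :
    escapesStep (text, "") c = (text ++ htmlB c, "") := by
  by_cases h1 : c = '`' <;> by_cases h2 : c = '<' <;> by_cases h3 : c = '>' <;>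
    by_cases h4 : c = '&' <;> by_cases h5 : c = '"' <;>
    simp_all [escapesStep, htmlB] <;> rfl

theorem foldl_escapes_eq (l : List Char) :
    ∀ text : String, (List.foldl escapesStep (text, "") l).1 = text ++ escapesAltGo l := by
  induction l using escapesAltGo.induct with
  | case1 => intro text; simp [escapesAltGo]
  | case2 => intro text; simp [escapesAltGo, List.foldl, escapesStep]
  | case3 rest ih =>
      intro text
      simp only [List.foldl, escapesAltGo]
      have h1 : escapesStep (text, "") '\\' = (text, "\\") := by simp [escapesStep]
      have h2 : escapesStep (text, "\\") '\r' = (text, "\r") := by simp [escapesStep]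
      have h3 : escapesStep (text, "\r") '\n' = (text ++ "&br;", "") := by simp [escapesStep]
      rw [h1, h2, h3, ih]
      simp [String.append_assoc]
  | case4 rest hne ih =>
      intro text
      simp only [List.foldl, escapesAltGo]
      have h1 : escapesStep (text, "") '\\' = (text, "\\") := by simp [escapesStep]
      have h2 : escapesStep (text, "\\") '\r' = (text, "\r") := by simp [escapesStep]
      rw [h1, h2]
      cases rest with
      | nil => simp [escapesAltGo]
      | cons c r =>
          have hc : c ≠ '\n' := by intro h; exact hne r (by rw [h])
          simp only [List.foldl]
          rw [step_cr_of_ne text c hc]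
          exact ih text
  | case5 rest ih =>
      intro text
      simp only [List.foldl, escapesAltGo]
      have h1 : escapesStep (text, "") '\\' = (text, "\\") := by simp [escapesStep]
      have h2 : escapesStep (text, "\\") '\n' = (text ++ "&br;", "") := by simp [escapesStep]
      rw [h1, h2, ih]
      simp [String.append_assoc]
  | case6 d rest hA hB hC ih =>
      intro text
      have hr : d ≠ '\r' := fun h => hB h
      have hn : d ≠ '\n' := fun h => hC h
      simp only [List.foldl, escapesAltGo]
      have h1 : escapesStep (text, "") '\\' = (text, "\\") := by simp [escapesStep]
      have h2 : escapesStep (text, "\\") d = (text ++ escPiece d, "") := by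
        cases h : PySem.Dict.get? escMap (String.singleton d) with
        | none => simp [escapesStep, escPiece, hr, hn, h]
        | some v => simp [escapesStep, escPiece, hr, hn, h, String.append_assoc]
      rw [h1, h2, ih]
      simp [String.append_assoc]
  | case7 c rest hn1 hn2 hn3 hn4 hn5 ih =>
      intro text
      have hc : c ≠ '\\' := by
        intro h
        cases rest with
        | nil => exact hn1 h rfl
        | cons d r => exact hn5 d r h rfl
      simp only [List.foldl, escapesAltGo]
      rw [step_plain text c hc, ih]
      simp [String.append_assoc]

-- ===== VERDICT (by name: the statement is the Claim_ definition above) =====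
theorem escapes_spec : Claim_equal_escapes := by
  intro block _
  unfold Spec_escapes escapes escapes_alt
  simpa using foldl_escapes_eq block.toList ""
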